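-- pv_equiv track=rewrite | github.com/quang2719/streamlit-in-5-mins | basic_web_deploy_streamlib/app2.py | percentage_distribution
-- ===== SOURCE A (Python) =====
-- def percentage_distribution(scores):
--     bins = {
--         '>= 80':0,
--         '60-79':0,
--         '40-59':0,
--         '< 40':0,
--     }
--     for score in scores:
--         if score >= 80:
--             bins['>= 80'] +=1
--         elif score >= 60:
--             bins['60-79'] +=1
--         elif score >= 40:
--             bins['40-59'] +=1
--         else:
--             bins['< 40']+=1
--
--     return bins
-- ===== SOURCE B (Python) =====
-- def percentage_distribution(scores):
--     thresholds = [40, 60, 80]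
--     labels = ['< 40', '40-59', '60-79', '>= 80']
--     bins = {'>= 80': 0, '60-79': 0, '40-59': 0, '< 40': 0}
--     for score in scores:
--         # hand-written bisect_right over the threshold table
--         lo, hi = 0, len(thresholds)
--         while lo < hi:
--             mid = (lo + hi) // 2
--             if score < thresholds[mid]:
--                 hi = mid
--             else:
--                 lo = mid + 1
--         bins[labels[lo]] += 1
--     return bins
-- ===== Notes on version B (the rewrite author's own statement) =====
-- stated objective: alternative
-- what changed: Replaced the if/elif comparison cascade with a sorted threshold table plus a parallel label list, using a hand-written binary search (bisect_right) to pick each score's bucket.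
import Mathlib
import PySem

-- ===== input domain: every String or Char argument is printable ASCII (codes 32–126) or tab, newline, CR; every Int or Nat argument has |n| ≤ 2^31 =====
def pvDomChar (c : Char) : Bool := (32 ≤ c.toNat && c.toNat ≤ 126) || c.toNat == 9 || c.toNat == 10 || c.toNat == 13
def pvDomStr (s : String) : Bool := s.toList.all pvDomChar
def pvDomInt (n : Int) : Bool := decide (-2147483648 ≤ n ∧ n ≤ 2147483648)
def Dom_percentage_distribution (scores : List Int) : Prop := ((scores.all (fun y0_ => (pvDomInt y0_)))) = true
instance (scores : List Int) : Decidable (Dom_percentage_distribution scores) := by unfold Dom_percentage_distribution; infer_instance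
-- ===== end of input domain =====

-- B replaces A's if/elif cascade with a threshold table and a binary-search bucket lookup (alternative decomposition, same cost).

-- ===== PORT A =====
def pdStepA (bins : PySem.Dict String Int) (score : Int) : PySem.Dict String Int :=
  if score ≥ 80 then bins.modify ">= 80" 0 (· + 1)
  else if score ≥ 60 then bins.modify "60-79" 0 (· + 1)
  else if score ≥ 40 then bins.modify "40-59" 0 (· + 1)
  else bins.modify "< 40" 0 (· + 1)

def percentage_distribution (scores : List Int) : List (String × Int) :=
  (scores.foldl pdStepA
    (PySem.Dict.ofList [(">= 80", 0), ("60-79", 0), ("40-59", 0), ("< 40", 0)])).items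

-- ===== PORT B =====
-- hand-written bisect_right loop from Source B; the loop keeps mid < a.length, so getD's default is never read
def pdBisectGo (a : List Int) (x : Int) (lo hi : Nat) : Nat :=
  if h : lo < hi then
    let mid := (lo + hi) / 2
    if x < a.getD mid 0 then pdBisectGo a x lo mid
    else pdBisectGo a x (mid + 1) hi
  else lo
termination_by hi - lo
decreasing_by all_goals omega

def pdLabels : List String := ["< 40", "40-59", "60-79", ">= 80"]
def pdThresholds : List Int := [40, 60, 80]

def pdStepB (bins : PySem.Dict String Int) (score : Int) : PySem.Dict String Int :=
  bins.modify (pdLabels.getD (pdBisectGo pdThresholds score 0 3) "") 0 (· + 1)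

def percentage_distribution_alt (scores : List Int) : List (String × Int) :=
  (scores.foldl pdStepB
    (PySem.Dict.ofList [(">= 80", 0), ("60-79", 0), ("40-59", 0), ("< 40", 0)])).items

-- ===== PRECONDITION & SPEC =====
def Spec_percentage_distribution (scores : List Int) (out : List (String × Int)) : Prop := out = percentage_distribution_alt scores
instance (scores : List Int) (out : List (String × Int)) : Decidable (Spec_percentage_distribution scores out) := by unfold Spec_percentage_distribution; infer_instance

-- ===== CLAIM (what is proved, stated in full; the proofs are below) =====
def Claim_equal_percentage_distribution : Prop := ∀ (scores : List Int), Dom_percentage_distribution scores → Spec_percentage_distribution scores (percentage_distribution scores)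

-- ===== LEMMAS AND PROOFS =====
-- the binary search over the fixed threshold table picks exactly the bucket index of the comparison cascade
theorem pd_bisect_eval (s : Int) : pdBisectGo pdThresholds s 0 3 =
    if s < 40 then 0 else if s < 60 then 1 else if s < 80 then 2 else 3 := by
  rw [pdBisectGo.eq_def]
  norm_num [pdThresholds]
  split_ifs <;>
    (repeat (first | omega | rfl |
      (rw [pdBisectGo.eq_def]; norm_num [pdThresholds]; try split_ifs <;> try omega)))

theorem pdStep_eq : pdStepA = pdStepB := by
  funext bins s
  simp only [pdStepA, pdStepB, pd_bisect_eval, pdLabels]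
  by_cases h80 : 80 ≤ s
  · simp [show ¬ s < 40 by omega, show ¬ s < 60 by omega, show ¬ s < 80 by omega, h80]
  · by_cases h60 : 60 ≤ s
    · simp [show ¬ s < 40 by omega, show ¬ s < 60 by omega, show s < 80 by omega, h80, h60]
    · by_cases h40 : 40 ≤ s
      · simp [show ¬ s < 40 by omega, show s < 60 by omega, h80, h60, h40]
      · simp [show s < 40 by omega, h80, h60, h40]

-- ===== VERDICT (by name: the statement is the Claim_ definition above) =====
theorem percentage_distribution_spec : Claim_equal_percentage_distribution := by
  intro scores _
  unfold Spec_percentage_distribution percentage_distribution percentage_distribution_alt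
  rw [pdStep_eq]
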